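-- pv_equiv track=rewrite | github.com/seemaullal/advent-of-code | 2025/01/solution.py | part_1
-- ===== SOURCE A (Python) =====
-- def part_1(instructions):
--     position = 50
--     result = 0
--     for rotation, distance in instructions:
--         if rotation == "L":
--             position = (position - distance) % 100
--         else:
--             position = (position + distance) % 100
--         if position == 0:
--             result += 1
--     return result
-- ===== SOURCE B (Python) =====
-- def part_1(instructions):
--     # Divide and conquer: a segment is summarized by (net signed delta, number of
--     # zero hits given the starting offset); halves combine by shifting the right
--     # half's offset by the left half's net delta.
--     def solve(seg, base):
--         if not seg:
--             return (0, 0)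
--         if len(seg) == 1:
--             r, d = seg[0]
--             net = -d if r == "L" else d
--             return (net, 1 if (50 + base + net) % 100 == 0 else 0)
--         mid = len(seg) // 2
--         lnet, lcnt = solve(seg[:mid], base)
--         rnet, rcnt = solve(seg[mid:], base + lnet)
--         return (lnet + rnet, lcnt + rcnt)
--     return solve(instructions, 0)[1]
-- ===== Notes on version B (the rewrite author's own statement) =====
-- stated objective: alternative
-- what changed: Replaced the fused left-to-right loop by recursive divide-and-conquer: each half of the instruction list is summarized as (net signed delta, zero-hit count given a starting offset) and the halves are combined by shifting the right half's offset by the left half's net delta.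
import Mathlib
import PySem

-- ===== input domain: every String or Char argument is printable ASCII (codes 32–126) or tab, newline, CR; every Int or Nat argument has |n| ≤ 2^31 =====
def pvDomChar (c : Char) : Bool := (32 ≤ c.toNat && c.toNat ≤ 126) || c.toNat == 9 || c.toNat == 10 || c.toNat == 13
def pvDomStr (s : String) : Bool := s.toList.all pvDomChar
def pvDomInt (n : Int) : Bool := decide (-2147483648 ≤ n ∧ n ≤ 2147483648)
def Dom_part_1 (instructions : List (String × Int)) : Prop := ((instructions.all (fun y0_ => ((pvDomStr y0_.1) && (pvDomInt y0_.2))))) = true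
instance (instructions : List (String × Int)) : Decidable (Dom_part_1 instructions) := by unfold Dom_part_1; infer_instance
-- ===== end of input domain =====

-- B replaces A's fused loop by divide-and-conquer over the instruction list; only the return value is claimed equal.

-- ===== PORT A =====
-- fused loop over (position, result)
def part_1 (instructions : List (String × Int)) : Int :=
  (instructions.foldl
    (fun (st : Int × Int) pr =>
      let position :=
        if pr.1 == "L" then PySem.Int.mod (st.1 - pr.2) 100
        else PySem.Int.mod (st.1 + pr.2) 100
      (position, if position == 0 then st.2 + 1 else st.2))
    (50, 0)).2

-- ===== PORT B =====
-- Source B's solve: divide and conquer; seg[:mid]/seg[mid:] with 0 ≤ mid ≤ len are exactly take/drop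
def pvSolve : List (String × Int) → Int → Int × Int
  | [], _ => (0, 0)
  | [pr], base =>
      let net := if pr.1 == "L" then -pr.2 else pr.2
      (net, if PySem.Int.mod (50 + base + net) 100 == 0 then 1 else 0)
  | a :: b :: tl, base =>
      let seg := a :: b :: tl
      let mid := seg.length / 2
      let l := pvSolve (seg.take mid) base
      let r := pvSolve (seg.drop mid) (base + l.1)
      (l.1 + r.1, l.2 + r.2)
  termination_by seg _ => seg.length
  decreasing_by
  · simp [List.length_take]; omega
  · simp [List.length_drop]; omega

def part_1_alt (instructions : List (String × Int)) : Int :=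
  (pvSolve instructions 0).2

-- ===== PRECONDITION & SPEC =====
def Spec_part_1 (instructions : List (String × Int)) (out : Int) : Prop := out = part_1_alt instructions
instance (instructions : List (String × Int)) (out : Int) : Decidable (Spec_part_1 instructions out) := by unfold Spec_part_1; infer_instance

-- ===== CLAIM (what is proved, stated in full; the proofs are below) =====
def Claim_equal_part_1 : Prop := ∀ (instructions : List (String × Int)), Dom_part_1 instructions → Spec_part_1 instructions (part_1 instructions)

-- ===== LEMMAS AND PROOFS =====

-- net delta of a segment
def pvD : List (String × Int) → Int
  | [] => 0
  | pr :: tl => (if pr.1 == "L" then -pr.2 else pr.2) + pvD tl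

-- zero-hit count of a segment from a given offset
def pvC : List (String × Int) → Int → Int
  | [], _ => 0
  | pr :: tl, base =>
      let net := if pr.1 == "L" then -pr.2 else pr.2
      (if PySem.Int.mod (50 + base + net) 100 == 0 then 1 else 0) + pvC tl (base + net)

theorem pvD_append (l1 l2 : List (String × Int)) : pvD (l1 ++ l2) = pvD l1 + pvD l2 := by
  induction l1 with
  | nil => simp [pvD]
  | cons hd tl ih => simp [pvD, ih]; ring

theorem pvC_append (l1 l2 : List (String × Int)) (base : Int) :
    pvC (l1 ++ l2) base = pvC l1 base + pvC l2 (base + pvD l1) := by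
  induction l1 generalizing base with
  | nil => simp [pvC, pvD]
  | cons hd tl ih =>
    simp only [List.cons_append, pvC, pvD, ih]
    ring_nf

theorem pvSolve_eq (seg : List (String × Int)) (base : Int) :
    pvSolve seg base = (pvD seg, pvC seg base) := by
  induction seg, base using pvSolve.induct with
  | case1 base => simp [pvSolve, pvD, pvC]
  | case2 pr base => simp [pvSolve, pvD, pvC]
  | case3 a b tl base seg mid l ih1 ih2 ih3 =>
    simp only [pvSolve]
    rw [ih3, ih1]
    simp only [seg, mid, l, ih1]
    have h : (a :: b :: tl).take ((a :: b :: tl).length / 2) ++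
        (a :: b :: tl).drop ((a :: b :: tl).length / 2) = a :: b :: tl :=
      List.take_append_drop _ _
    conv_rhs => rw [← h]
    rw [pvD_append, pvC_append]

theorem pv_mod_shift (a d : Int) :
    PySem.Int.mod (PySem.Int.mod a 100 + d) 100 = PySem.Int.mod (a + d) 100 := by
  rw [PySem.Int.mod_eq_emod_of_pos (a := PySem.Int.mod a 100 + d) (b := 100) (by norm_num),
      PySem.Int.mod_eq_emod_of_pos (a := a) (b := 100) (by norm_num),
      PySem.Int.mod_eq_emod_of_pos (a := a + d) (b := 100) (by norm_num)]
  omega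

theorem pv_loop (l : List (String × Int)) (acc r : Int) :
    (l.foldl
      (fun (st : Int × Int) pr =>
        let position :=
          if pr.1 == "L" then PySem.Int.mod (st.1 - pr.2) 100
          else PySem.Int.mod (st.1 + pr.2) 100
        (position, if position == 0 then st.2 + 1 else st.2))
      (PySem.Int.mod (50 + acc) 100, r)).2
    = r + pvC l acc := by
  induction l generalizing acc r with
  | nil => simp [pvC]
  | cons hd tl ih =>
    have h1 : ∀ d : Int, PySem.Int.mod (PySem.Int.mod (50 + acc) 100 + d) 100
        = PySem.Int.mod (50 + (acc + d)) 100 := by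
      intro d; rw [pv_mod_shift, add_assoc]
    cases hb : (hd.1 == "L") with
    | true =>
      have h2 : PySem.Int.mod (PySem.Int.mod (50 + acc) 100 - hd.2) 100
          = PySem.Int.mod (50 + (acc + -hd.2)) 100 := by
        rw [sub_eq_add_neg, h1]
      simp only [List.foldl_cons, pvC, hb, if_true, h2]
      rw [ih (acc + -hd.2)]
      have : (50 + acc + -hd.2) = (50 + (acc + -hd.2)) := by ring
      rw [this]
      split_ifs <;> ring
    | false =>
      simp only [List.foldl_cons, pvC, hb, Bool.false_eq_true, if_false, h1]
      rw [ih (acc + hd.2)]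
      have : (50 + acc + hd.2) = (50 + (acc + hd.2)) := by ring
      rw [this]
      split_ifs <;> ring

-- ===== VERDICT (by name: the statement is the Claim_ definition above) =====
theorem part_1_spec : Claim_equal_part_1 := by
  intro instructions _
  unfold Spec_part_1 part_1 part_1_alt
  rw [pvSolve_eq]
  have h := pv_loop instructions 0 0
  simp only [show PySem.Int.mod (50 + 0) 100 = (50 : Int) by decide, zero_add] at h
  simpa using h
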